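-- pv_equiv track=rewrite | github.com/alexro/pypypy | code_forces/ShagVBud/03.py | solve
-- ===== SOURCE A (Python) =====
-- def solve(a, n):
--     a.sort(key=lambda x: x[0], reverse=True)
--     b = []
--     for item in a:
--         b.append(item)
--         n -= item[0]
--         if n <= 0:
--             break
--     b.sort(key=lambda x: x[1])
--     s = []
--     for i, v in enumerate(b):
--         s.append(str(v[1]))
--     return ' '.join(s)
-- ===== SOURCE B (Python) =====
-- def solve(a, n):
--     # Selection-based greedy: repeatedly remove the first heaviest element from
--     # the pool until the required sum is covered; no global sort of `a`.
--     # (Unlike A, this does not mutate `a`; the return value is identical.)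
--     pool = list(a)
--     chosen = []
--     while pool:
--         w = pool[0][0]
--         for x, _ in pool[1:]:
--             if x > w:
--                 w = x
--         item = None
--         rest = []
--         for it in pool:
--             if item is None and it[0] == w:
--                 item = it
--             else:
--                 rest.append(it)
--         pool = rest
--         chosen.append(item)
--         n -= item[0]
--         if n <= 0:
--             break
--     chosen.sort(key=lambda x: x[1])
--     return ' '.join(str(v[1]) for v in chosen)
-- ===== Notes on version B (the rewrite author's own statement) =====
-- stated objective: alternative
-- what changed: Replaced A's global descending sort plus prefix-taking loop by a selection-based greedy: each round scans the remaining pool for its maximal weight, removes the first element carrying it, and stops once the required sum is covered; B never sorts the input list (and, unlike A, does not mutate it).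
import Mathlib
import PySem

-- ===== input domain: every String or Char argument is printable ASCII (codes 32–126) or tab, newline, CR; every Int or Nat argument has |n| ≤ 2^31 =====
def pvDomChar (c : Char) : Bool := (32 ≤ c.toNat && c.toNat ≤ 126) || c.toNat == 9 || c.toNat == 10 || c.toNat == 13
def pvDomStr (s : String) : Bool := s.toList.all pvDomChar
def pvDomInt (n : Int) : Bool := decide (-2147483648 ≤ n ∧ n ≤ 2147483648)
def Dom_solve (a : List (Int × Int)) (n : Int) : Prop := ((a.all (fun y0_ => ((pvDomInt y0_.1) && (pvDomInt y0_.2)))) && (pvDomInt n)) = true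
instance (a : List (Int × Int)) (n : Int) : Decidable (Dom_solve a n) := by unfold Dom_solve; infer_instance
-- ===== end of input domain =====

-- B replaces A's global descending sort + prefix-taking loop by a selection-based greedy
-- (each round removes the first heaviest element of the remaining pool); same return value.
-- A sorts its argument list in place and B does not: the equivalence proved here is about
-- the RETURN value only.

-- ===== PORT A =====
-- A's for-loop with break: append item, decrement n, stop once n ≤ 0.
def solveLoopA : List (Int × Int) → Int → List (Int × Int)
  | [], _ => []
  | item :: rest, n =>
      if n - item.1 ≤ 0 then [item] else item :: solveLoopA rest (n - item.1)

def solve (a : List (Int × Int)) (n : Int) : String :=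
  let a' := PySem.List.sorted a (fun x => x.1) true
  let b := PySem.List.sorted (solveLoopA a' n) (fun x => x.2) false
  PySem.Str.join " " (b.map (fun v => PySem.Int.toStr v.2))

-- ===== PORT B =====
-- B's `w = pool[0][0]; for x, _ in pool[1:]: if x > w: w = x` scan.
def maxW : List (Int × Int) → Int → Int
  | [], w => w
  | p :: tl, w => maxW tl (if p.1 > w then p.1 else w)

-- B's second loop: remove the first element of weight w (Python keeps an `item is None`
-- flag; once the item is taken every later element is appended, i.e. the rest is the tail).
-- The (0,0) default is unreachable: B only calls it with w a weight occurring in the list.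
def splitW : Int → List (Int × Int) → (Int × Int) × List (Int × Int)
  | _, [] => ((0, 0), [])
  | w, p :: tl => if p.1 = w then (p, tl) else
      let pr := splitW w tl
      (pr.1, p :: pr.2)

-- termination facts for B's while-loop (cited by `decreasing_by` below)
lemma maxW_attained : ∀ (tl : List (Int × Int)) (a : Int),
    maxW tl a = a ∨ ∃ p ∈ tl, p.1 = maxW tl a := by
  intro tl
  induction tl with
  | nil => intro a; exact Or.inl rfl
  | cons p tl ih =>
      intro a
      simp only [maxW]
      rcases ih (if p.1 > a then p.1 else a) with h | ⟨q, hq, hq'⟩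
      · by_cases hp : p.1 > a
        · refine Or.inr ⟨p, List.mem_cons_self .., ?_⟩
          rw [h, if_pos hp]
        · rw [h, if_neg hp]; exact Or.inl rfl
      · exact Or.inr ⟨q, List.mem_cons_of_mem _ hq, hq'⟩

lemma splitW_length : ∀ (l : List (Int × Int)) (w : Int), (∃ p ∈ l, p.1 = w) →
    (splitW w l).2.length + 1 = l.length := by
  intro l
  induction l with
  | nil => intro w h; simp at h
  | cons p tl ih =>
      intro w h
      simp only [splitW]
      by_cases hp : p.1 = w
      · simp [hp]
      · have : ∃ q ∈ tl, q.1 = w := by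
          rcases h with ⟨q, hq, hq'⟩
          rcases List.mem_cons.mp hq with rfl | hq2
          · exact absurd hq' hp
          · exact ⟨q, hq2, hq'⟩
        simp [hp, ih w this]

lemma splitW_cons_length (p : Int × Int) (tl : List (Int × Int)) :
    (splitW (maxW tl p.1) (p :: tl)).2.length < (p :: tl).length := by
  have h : ∃ q ∈ p :: tl, q.1 = maxW tl p.1 := by
    rcases maxW_attained tl p.1 with h | ⟨q, hq, hq'⟩
    · exact ⟨p, by simp, h.symm⟩
    · exact ⟨q, by simp [hq], hq'⟩
  have := splitW_length (p :: tl) (maxW tl p.1) h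
  simp at this ⊢
  omega

-- B's while-loop: pick the first heaviest element, stop once the needed sum is covered.
def loopB : List (Int × Int) → Int → List (Int × Int)
  | [], _ => []
  | p :: tl, n =>
      let pr := splitW (maxW tl p.1) (p :: tl)
      if n - pr.1.1 ≤ 0 then [pr.1] else pr.1 :: loopB pr.2 (n - pr.1.1)
  termination_by pool _ => pool.length
  decreasing_by exact splitW_cons_length p tl

def solve_alt (a : List (Int × Int)) (n : Int) : String :=
  let chosen := loopB a n
  let b := PySem.List.sorted chosen (fun x => x.2) false
  PySem.Str.join " " (b.map (fun v => PySem.Int.toStr v.2))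

-- ===== PRECONDITION & SPEC =====
def Spec_solve (a : List (Int × Int)) (n : Int) (out : String) : Prop := out = solve_alt a n
instance (a : List (Int × Int)) (n : Int) (out : String) : Decidable (Spec_solve a n out) := by unfold Spec_solve; infer_instance

-- ===== CLAIM (what is proved, stated in full; the proofs are below) =====
def Claim_equal_solve : Prop := ∀ (a : List (Int × Int)) (n : Int), Dom_solve a n → Spec_solve a n (solve a n)

-- ===== LEMMAS AND PROOFS =====

-- proof-side recursive form of "first heaviest element and the remaining pool"
def extractMax : (Int × Int) → List (Int × Int) → (Int × Int) × List (Int × Int)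
  | x, [] => (x, [])
  | x, y :: tl =>
      let pr := extractMax y tl
      if x.1 ≥ pr.1.1 then (x, y :: tl) else (pr.1, x :: pr.2)

lemma if_gt_eq_max (p x : Int) : (if p > x then p else x) = max x p := by
  by_cases h : p > x
  · rw [if_pos h, max_eq_right h.le]
  · rw [if_neg h, max_eq_left (le_of_not_gt h)]

lemma maxW_max : ∀ (tl : List (Int × Int)) (a b : Int),
    maxW tl (max a b) = max a (maxW tl b) := by
  intro tl
  induction tl with
  | nil => intro a b; rfl
  | cons p tl ih =>
      intro a b
      simp only [maxW, if_gt_eq_max]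
      rw [max_assoc, ih a (max b p.1)]

lemma extractMax_weight : ∀ (tl : List (Int × Int)) (x : Int × Int),
    (extractMax x tl).1.1 = maxW tl x.1 := by
  intro tl
  induction tl with
  | nil => intro x; rfl
  | cons y tl ih =>
      intro x
      simp only [extractMax, maxW, if_gt_eq_max, maxW_max, ← ih y]
      by_cases h : x.1 ≥ (extractMax y tl).1.1
      · rw [if_pos h, max_eq_left h]
      · rw [if_neg h, max_eq_right (le_of_not_ge h)]

lemma splitW_cons_eq (w : Int) (p : Int × Int) (t : List (Int × Int)) :
    splitW w (p :: t) =
      if p.1 = w then (p, t) else ((splitW w t).1, p :: (splitW w t).2) := by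
  rw [splitW]

lemma extractMax_cons (x y : Int × Int) (tl : List (Int × Int)) :
    extractMax x (y :: tl) =
      if x.1 ≥ (extractMax y tl).1.1 then (x, y :: tl)
      else ((extractMax y tl).1, x :: (extractMax y tl).2) := by
  rw [extractMax]

lemma splitW_extract : ∀ (tl : List (Int × Int)) (x : Int × Int),
    splitW (maxW tl x.1) (x :: tl) = extractMax x tl := by
  intro tl
  induction tl with
  | nil => intro x; simp [maxW, splitW, extractMax]
  | cons y tl ih =>
      intro x
      have hm := extractMax_weight tl y
      have hw : maxW (y :: tl) x.1 = max x.1 (maxW tl y.1) := by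
        simp only [maxW, if_gt_eq_max, maxW_max]
      rw [splitW_cons_eq, extractMax_cons]
      by_cases h : x.1 ≥ (extractMax y tl).1.1
      · have hx : x.1 = maxW (y :: tl) x.1 := by
          rw [hw, ← hm]; exact (max_eq_left h).symm
        rw [if_pos hx, if_pos h]
      · have hw2 : maxW (y :: tl) x.1 = maxW tl y.1 := by
          rw [hw, ← hm]; exact max_eq_right (le_of_not_ge h)
        have hx : ¬ (x.1 = maxW (y :: tl) x.1) := by
          rw [hw2, ← hm]; intro hc; exact h (le_of_eq hc.symm)
        rw [if_neg hx, if_neg h, hw2, ih y]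

lemma extractMax_append : ∀ (tl : List (Int × Int)) (x z : Int × Int),
    extractMax x (tl ++ [z]) =
      (if (extractMax x tl).1.1 ≥ z.1
        then ((extractMax x tl).1, (extractMax x tl).2 ++ [z])
        else (z, x :: tl)) := by
  intro tl
  induction tl with
  | nil =>
      intro x z
      simp only [List.nil_append, extractMax_cons]
      show (if x.1 ≥ (extractMax z []).1.1 then _ else _) = _
      simp only [extractMax]
      by_cases h : x.1 ≥ z.1 <;> simp [h]
  | cons y tl ih =>
      intro x z
      have h1 : (y :: tl) ++ [z] = y :: (tl ++ [z]) := rfl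
      rw [h1, extractMax_cons, ih y z, extractMax_cons]
      by_cases h0 : (extractMax y tl).1.1 ≥ z.1
      · rw [if_pos h0]
        by_cases h2 : x.1 ≥ (extractMax y tl).1.1
        · rw [if_pos h2, if_pos h2, if_pos (le_trans h0 h2)]
          simp
        · rw [if_neg h2, if_neg h2, if_pos h0]
          simp
      · rw [if_neg h0]
        by_cases h2 : x.1 ≥ z.1
        · have h3 : x.1 ≥ (extractMax y tl).1.1 :=
            le_of_lt (lt_of_lt_of_le (lt_of_not_ge h0) h2)
          rw [if_pos h2, if_pos h3, if_pos h2]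
          simp
        · rw [if_neg h2]
          by_cases h4 : x.1 ≥ (extractMax y tl).1.1
          · rw [if_pos h4, if_neg h2]
          · rw [if_neg h4, if_neg h0]

lemma extractMax_len : ∀ (tl : List (Int × Int)) (x : Int × Int),
    (extractMax x tl).2.length = tl.length := by
  intro tl
  induction tl with
  | nil => intro x; rfl
  | cons y tl ih =>
      intro x
      simp only [extractMax]
      by_cases h : x.1 ≥ (extractMax y tl).1.1
      · rw [if_pos h]
      · rw [if_neg h]; simp [ih y]

-- appending one element to the input = one more insertion (insertion-sort shape of PySem.List.sorted)
lemma sorted_rev_append_one (l : List (Int × Int)) (z : Int × Int) :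
    PySem.List.sorted (l ++ [z]) (fun v => v.1) true =
      PySem.List.insertBy (fun a b => decide (b.1 < a.1)) z
        (PySem.List.sorted l (fun v => v.1) true) := by
  simp [PySem.List.sorted, List.foldl_append]

-- stable descending sort = first heaviest element in front of the sorted rest
lemma sorted_rev_extract : ∀ (l : List (Int × Int)) (x : Int × Int),
    PySem.List.sorted (x :: l) (fun v => v.1) true =
      (extractMax x l).1 :: PySem.List.sorted (extractMax x l).2 (fun v => v.1) true := by
  intro l
  induction l using List.reverseRecOn with
  | nil => intro x; simp [PySem.List.sorted, PySem.List.insertBy, extractMax]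
  | append_singleton t z ih =>
      intro x
      have h1 : x :: (t ++ [z]) = (x :: t) ++ [z] := rfl
      rw [h1, sorted_rev_append_one, ih x, extractMax_append]
      by_cases h : (extractMax x t).1.1 ≥ z.1
      · rw [if_pos h]
        simp only [PySem.List.insertBy, sorted_rev_append_one]
        have hb : ¬ ((extractMax x t).1.1 < z.1) := not_lt_of_ge h
        simp [hb]
      · rw [if_neg h]
        simp only [PySem.List.insertBy]
        have hb : (extractMax x t).1.1 < z.1 := lt_of_not_ge h
        simp only [hb, decide_true, if_pos]
        rw [ih x]

lemma loopA_eq_loopB_aux : ∀ (N : Nat) (l : List (Int × Int)), l.length ≤ N → ∀ (n : Int),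
    solveLoopA (PySem.List.sorted l (fun v => v.1) true) n = loopB l n := by
  intro N
  induction N with
  | zero =>
      intro l hl n
      have : l = [] := List.length_eq_zero_iff.mp (Nat.le_zero.mp hl)
      subst this
      simp [PySem.List.sorted, solveLoopA, loopB]
  | succ N ih =>
      intro l hl n
      match l with
      | [] => simp [PySem.List.sorted, solveLoopA, loopB]
      | p :: tl =>
          rw [sorted_rev_extract tl p]
          rw [loopB, splitW_extract tl p]
          simp only [solveLoopA]
          by_cases h : n - (extractMax p tl).1.1 ≤ 0
          · rw [if_pos h, if_pos h]
          · rw [if_neg h, if_neg h]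
            have hlen : (extractMax p tl).2.length ≤ N := by
              have := extractMax_len tl p
              simp at hl
              omega
            rw [ih (extractMax p tl).2 hlen]

lemma loopA_eq_loopB (l : List (Int × Int)) (n : Int) :
    solveLoopA (PySem.List.sorted l (fun v => v.1) true) n = loopB l n :=
  loopA_eq_loopB_aux l.length l (le_refl _) n

-- ===== VERDICT (by name: the statement is the Claim_ definition above) =====
theorem solve_spec : Claim_equal_solve := by
  intro a n _
  unfold Spec_solve solve solve_alt
  simp only [loopA_eq_loopB]
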